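-- pv_equiv track=rewrite | github.com/Lightning-AI/torchmetrics | torchmetrics/functional/text/ter.py | _find_shifted_pairs
-- ===== SOURCE A (Python) =====
-- from typing import Dict, Iterator, List, Optional, Sequence, Tuple, Union
--
-- _MAX_SHIFT_SIZE = 10
--
-- _MAX_SHIFT_DIST = 50
--
-- def _find_shifted_pairs(hypothesis_words: List[str], reference_words: List[str]) -> Iterator[Tuple[int, int, int]]:
--     """Find matching word sub-sequences in two lists of words. Ignores sub-sequences starting at the same position.
--
--     Args:
--         hypothesis_words:
--             A list of a tokenized hypothesis sentence.
--         reference_words: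
--             A list of a tokenized reference sentence.
--
--     Return:
--         Yields tuples of `(reference_start, hypothesis_start, length` such that:
--         reference_words[reference_start : reference_start + length] ==\
--             hypothesis_words[hypothesis_start : hypothesis_start + length]
--
--         hypothesis_start:
--             A list of hypothesis start indices.
--         reference_start:
--             A list of reference start indices.
--         length:
--             A length of a word span to be considered.
--     """
--     for hypothesis_start in range(len(hypothesis_words)):
--         for reference_start in range(len(reference_words)):
--             # this is slightly different from what tercom does but this should
--             # really only kick in in degenerate cases
--             if abs(reference_start - hypothesis_start) > _MAX_SHIFT_DIST:
--                 continue
--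
--             for length in range(1, _MAX_SHIFT_SIZE):
--                 # Check if hypothesis and reference are equal so far
--                 if hypothesis_words[hypothesis_start + length - 1] != reference_words[reference_start + length - 1]:
--                     break
--                 yield hypothesis_start, reference_start, length
--
--                 # Stop processing once a sequence is consumed.
--                 _hyp = len(hypothesis_words) == hypothesis_start + length
--                 _ref = len(reference_words) == reference_start + length
--                 if _hyp or _ref:
--                     break
-- ===== SOURCE B (Python) =====
-- from typing import Dict, Iterator, List, Tuple
--
-- _MAX_SHIFT_SIZE = 10
--
-- _MAX_SHIFT_DIST = 50
--
-- def _find_shifted_pairs(hypothesis_words: List[str], reference_words: List[str]) -> Iterator[Tuple[int, int, int]]: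
--     """Index reference positions by word, then per hypothesis word visit only the
--     reference positions holding that exact word (window-clipped), extending each match."""
--     index: Dict[str, List[int]] = {}
--     for j, word in enumerate(reference_words):
--         index.setdefault(word, []).append(j)
--     n_hyp = len(hypothesis_words)
--     n_ref = len(reference_words)
--     for i, word in enumerate(hypothesis_words):
--         for j in index.get(word, []):
--             if j < i - _MAX_SHIFT_DIST or j > i + _MAX_SHIFT_DIST:
--                 continue
--             yield i, j, 1
--             length = 1
--             max_length = min(_MAX_SHIFT_SIZE - 1, n_hyp - i, n_ref - j)
--             while length < max_length and hypothesis_words[i + length] == reference_words[j + length]: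
--                 length += 1
--                 yield i, j, length
-- ===== Notes on version B (the rewrite author's own statement) =====
-- stated objective: alternative
-- what changed: B first builds a hash index from each reference word to its (ascending) positions, then per hypothesis word visits only the reference positions holding that exact word (window-clipped) and extends each guaranteed match, instead of A's scan of every (hypothesis, reference) position pair with a comparison inside; on duplicate-heavy inputs the candidate set is as large as A's, so no speed is claimed
import Mathlib
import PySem

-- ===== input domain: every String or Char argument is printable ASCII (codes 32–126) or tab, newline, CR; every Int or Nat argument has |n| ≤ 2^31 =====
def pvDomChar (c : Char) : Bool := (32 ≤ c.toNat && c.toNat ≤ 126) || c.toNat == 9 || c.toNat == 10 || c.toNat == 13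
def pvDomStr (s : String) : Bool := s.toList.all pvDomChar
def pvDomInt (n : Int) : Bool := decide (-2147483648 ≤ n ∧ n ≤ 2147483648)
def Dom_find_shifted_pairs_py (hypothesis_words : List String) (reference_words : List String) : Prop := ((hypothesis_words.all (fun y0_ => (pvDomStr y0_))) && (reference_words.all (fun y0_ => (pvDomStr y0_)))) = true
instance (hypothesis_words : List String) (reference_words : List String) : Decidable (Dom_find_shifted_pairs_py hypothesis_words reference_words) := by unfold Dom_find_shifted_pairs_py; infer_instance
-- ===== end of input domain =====

-- B replaces A's scan of every (hypothesis, reference) position pair by a hash index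
-- from each reference word to its positions: per hypothesis word only the reference
-- positions holding that exact word (inside the ±50 window) are visited and extended.

-- ===== PORT A =====
-- inner `for length in range(1, 10)` loop of A, carried as the explicit list of remaining lengths;
-- the element comparisons transliterate `hypothesis_words[i] != reference_words[j]` via pyGet?
-- (the Python indices are always in range on the executions A performs).
def pvA_len (hyp ref : List String) (hs rs : Int) : List Int → List (Int × Int × Int)
  | [] => []
  | l :: ls =>
    if PySem.List.pyGet? hyp (hs + l - 1) ≠ PySem.List.pyGet? ref (rs + l - 1) then []
    else
      (hs, rs, l) ::
        (if (hyp.length : Int) = hs + l ∨ (ref.length : Int) = rs + l then []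
         else pvA_len hyp ref hs rs ls)

def find_shifted_pairs_py (hypothesis_words : List String) (reference_words : List String) : List (Int × Int × Int) :=
  (PySem.List.pyRange 0 (hypothesis_words.length : Int) 1).foldl
    (fun acc hypothesis_start =>
      acc ++ (PySem.List.pyRange 0 (reference_words.length : Int) 1).foldl
        (fun acc2 reference_start =>
          acc2 ++ (if (reference_start - hypothesis_start).natAbs > 50 then []  -- continue
                   else pvA_len hypothesis_words reference_words hypothesis_start reference_start
                          (PySem.List.pyRange 1 10 1)))
        [])
    []

-- ===== PORT B =====
-- the `index.setdefault(word, []).append(j)` loop: d[word] = d.get(word, []) + [j]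
def pvIndex (reference_words : List String) : PySem.Dict String (List Int) :=
  (PySem.List.enumerate reference_words).foldl
    (fun d p => d.modify p.2 [] (· ++ [p.1])) PySem.Dict.empty

-- B's `while length < max_length and hyp[i+length] == ref[j+length]` loop;
-- fuel = max_length - length, so the recursion mirrors the while condition exactly.
def pvB_ext (hyp ref : List String) (i j : Int) : Nat → Int → List (Int × Int × Int)
  | 0, _ => []
  | fuel + 1, len =>
    if PySem.List.pyGet? hyp (i + len) = PySem.List.pyGet? ref (j + len) then
      (i, j, len + 1) :: pvB_ext hyp ref i j fuel (len + 1)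
    else []

def find_shifted_pairs_py_alt (hypothesis_words : List String) (reference_words : List String) : List (Int × Int × Int) :=
  let index := pvIndex reference_words
  let n_hyp : Int := hypothesis_words.length
  let n_ref : Int := reference_words.length
  (PySem.List.enumerate hypothesis_words).foldl
    (fun acc p =>
      acc ++ (index.getD p.2 []).foldl
        (fun acc2 j =>
          acc2 ++ (if j < p.1 - 50 ∨ j > p.1 + 50 then []  -- continue
                   else (p.1, j, 1) ::
                     pvB_ext hypothesis_words reference_words p.1 j
                       (min 9 (min (n_hyp - p.1) (n_ref - j)) - 1).toNat 1))
        [])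
    []

-- ===== PRECONDITION & SPEC =====
def Spec_find_shifted_pairs_py (hypothesis_words : List String) (reference_words : List String) (out : List (Int × Int × Int)) : Prop := out = find_shifted_pairs_py_alt hypothesis_words reference_words
instance (hypothesis_words : List String) (reference_words : List String) (out : List (Int × Int × Int)) : Decidable (Spec_find_shifted_pairs_py hypothesis_words reference_words out) := by unfold Spec_find_shifted_pairs_py; infer_instance

-- ===== CLAIM (what is proved, stated in full; the proofs are below) =====
def Claim_equal_find_shifted_pairs_py : Prop := ∀ (hypothesis_words : List String) (reference_words : List String), Dom_find_shifted_pairs_py hypothesis_words reference_words → Spec_find_shifted_pairs_py hypothesis_words reference_words (find_shifted_pairs_py hypothesis_words reference_words)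

-- ===== LEMMAS AND PROOFS =====

-- every entry of enumerate L s is (s + k, L[k])
theorem pv_enum_mem {α : Type} (L : List α) :
    ∀ (s : Int) (p : Int × α), p ∈ PySem.List.enumerate L s →
    ∃ k : Nat, k < L.length ∧ p.1 = s + k ∧ L[k]? = some p.2 := by
  induction L with
  | nil => intro s p hp; simp [PySem.List.enumerate_nil] at hp
  | cons x xs ih =>
    intro s p hp
    rw [PySem.List.enumerate_cons, List.mem_cons] at hp
    rcases hp with h | h
    · exact ⟨0, by simp, by simp [h], by simp [h]⟩
    · obtain ⟨k, hk, h1, h2⟩ := ih (s + 1) p h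
      exact ⟨k + 1, by simpa using hk, by omega, by simpa using h2⟩

-- a flatMap over the first components of enumerate is a flatMap over the index range
theorem pv_enum_flatMap {α β : Type} (L : List α) :
    ∀ (s : Int) (f : Int → List β),
    (PySem.List.enumerate L s).flatMap (fun p => f p.1)
      = (PySem.List.pyRange s (s + L.length) 1).flatMap f := by
  induction L with
  | nil =>
    intro s f
    rw [PySem.List.pyRange_one_eq_nil (by simp)]
    simp [PySem.List.enumerate_nil]
  | cons x xs ih =>
    intro s f
    rw [show s + ((x :: xs).length : Int) = (s + 1) + (xs.length : Int) by
      simp only [List.length_cons]; push_cast; ring]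
    rw [PySem.List.enumerate_cons, PySem.List.pyRange_one_cons (by omega)]
    simp only [List.flatMap_cons]
    rw [ih (s + 1) f]

-- a flatMap over a filtered-and-projected list is a flatMap with an if
theorem pv_flatMap_filter_map {α β γ : Type} (l : List α) (q : α → Bool) (m : α → β)
    (g : β → List γ) :
    (((l.filter q).map m).flatMap g) = l.flatMap (fun x => if q x then g (m x) else []) := by
  induction l with
  | nil => simp
  | cons x xs ih => cases hq : q x <;> simp [hq, ih]

-- the index maps each word to the ascending list of its reference positions
theorem pvIndex_getD (ref : List String) (w : String) :
    (pvIndex ref).getD w []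
      = ((PySem.List.enumerate ref).filter (fun q => q.2 == w)).map (·.1) := by
  have hswap : (PySem.List.enumerate ref).foldl
      (fun d p => d.modify p.2 [] (· ++ [p.1])) PySem.Dict.empty
    = (((PySem.List.enumerate ref).map (fun q => (q.2, q.1))).foldl
      (fun d p => d.modify p.1 [] (· ++ [p.2])) PySem.Dict.empty) := by
    rw [List.foldl_map]
  rw [pvIndex, hswap, PySem.Dict.getD_foldl_modify_append]
  simp [List.filter_map, List.map_map, Function.comp_def]

-- Core lemma: on in-range states, A's remaining-lengths loop equals B's fueled while loop.
theorem pvA_len_eq_pvB_ext (hyp ref : List String) (hs rs : Int) :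
    ∀ (fuel : Nat) (len : Int), 0 ≤ len →
    hs + len < (hyp.length : Int) → rs + len < (ref.length : Int) →
    (fuel : Int) = min 9 (min ((hyp.length : Int) - hs) ((ref.length : Int) - rs)) - len →
    pvA_len hyp ref hs rs (PySem.List.pyRange (len + 1) 10 1) = pvB_ext hyp ref hs rs fuel len := by
  intro fuel
  induction fuel with
  | zero =>
    intro len h0 hh hr hf
    have h9 : len = 9 := by omega
    subst h9
    rw [PySem.List.pyRange_one_eq_nil (by omega)]
    rfl
  | succ f ih =>
    intro len h0 hh hr hf
    rw [PySem.List.pyRange_one_cons (by omega : len + 1 < 10)]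
    simp only [pvA_len, pvB_ext]
    have harith : hs + (len + 1) - 1 = hs + len := by omega
    have harith2 : rs + (len + 1) - 1 = rs + len := by omega
    rw [harith, harith2]
    by_cases heq : PySem.List.pyGet? hyp (hs + len) = PySem.List.pyGet? ref (rs + len)
    · rw [if_neg (by simpa using heq), if_pos heq]
      by_cases hcons : (hyp.length : Int) = hs + (len + 1) ∨ (ref.length : Int) = rs + (len + 1)
      · rw [if_pos hcons]
        have hf0 : f = 0 := by omega
        subst hf0
        rfl
      · rw [if_neg hcons]
        rw [not_or] at hcons
        exact congrArg _ (ih (len + 1) (by omega) (by omega) (by omega) (by omega))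
    · rw [if_pos (by simpa using heq), if_neg heq]

-- per hypothesis position: A's full reference scan with the window skip equals B's
-- scan of the indexed occurrence list of the hypothesis word (window-clipped)
theorem pv_row (hyp ref : List String) (i : Int) (w : String)
    (hi : PySem.List.pyGet? hyp i = some w) (_hi0 : 0 ≤ i) (hin : i < (hyp.length : Int)) :
    (PySem.List.pyRange 0 (ref.length : Int) 1).flatMap
      (fun j => if (j - i).natAbs > 50 then []
                else pvA_len hyp ref i j (PySem.List.pyRange 1 10 1))
    = ((pvIndex ref).getD w []).flatMap
      (fun j => if j < i - 50 ∨ j > i + 50 then []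
                else (i, j, 1) ::
                  pvB_ext hyp ref i j
                    (min 9 (min ((hyp.length : Int) - i) ((ref.length : Int) - j)) - 1).toNat 1) := by
  rw [pvIndex_getD, pv_flatMap_filter_map]
  have hzero : (PySem.List.pyRange 0 (ref.length : Int) 1)
      = PySem.List.pyRange 0 (0 + (ref.length : Int)) 1 := by norm_num
  rw [hzero, ← pv_enum_flatMap]
  apply List.flatMap_congr
  intro q hq
  obtain ⟨k, hk, hk1, hk2⟩ := pv_enum_mem ref 0 q hq
  have hj0 : 0 ≤ q.1 := by omega
  have hjm : q.1 < (ref.length : Int) := by omega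
  have hrefq : PySem.List.pyGet? ref q.1 = some q.2 := by
    rw [hk1]
    simpa [PySem.List.pyGet?_natCast] using hk2
  by_cases hw : q.2 = w
  · subst hw
    rw [if_pos (show (q.2 == q.2) = true by simp)]
    by_cases hwin : (q.1 - i).natAbs > 50
    · rw [if_pos hwin, if_pos (by omega)]
    · rw [if_neg hwin, if_neg (by omega)]
      -- both indices in range, first words equal: one unfold of B's loop + the core lemma
      set F : Int := min 9 (min ((hyp.length : Int) - i) ((ref.length : Int) - q.1)) with hF
      have hF1 : 1 ≤ F := by omega
      have hfu : F.toNat = (F - 1).toNat + 1 := by omega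
      have := pvA_len_eq_pvB_ext hyp ref i q.1 F.toNat 0 le_rfl (by omega) (by omega) (by omega)
      rw [show (0 : Int) + 1 = 1 by norm_num] at this
      rw [this, hfu]
      simp only [pvB_ext]
      rw [if_pos (by simp only [add_zero]; rw [hi, hrefq]), show (0 : Int) + 1 = 1 by norm_num]
  · rw [if_neg (show ¬ (q.2 == w) = true by simpa using hw)]
    by_cases hwin : (q.1 - i).natAbs > 50
    · rw [if_pos hwin]
    · rw [if_neg hwin]
      rw [PySem.List.pyRange_one_cons (by norm_num : (1 : Int) < 10)]
      simp only [pvA_len]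
      rw [if_pos (by
        rw [show i + 1 - 1 = i by omega, show q.1 + 1 - 1 = q.1 by omega, hi, hrefq]
        simp [Ne.symm hw])]

-- ===== VERDICT (by name: the statement is the Claim_ definition above) =====
theorem find_shifted_pairs_py_spec : Claim_equal_find_shifted_pairs_py := by
  intro hyp ref _
  unfold Spec_find_shifted_pairs_py find_shifted_pairs_py find_shifted_pairs_py_alt
  simp only [PySem.List.foldl_append_eq_flatMap, List.nil_append]
  have hzero : (PySem.List.pyRange 0 (hyp.length : Int) 1)
      = PySem.List.pyRange 0 (0 + (hyp.length : Int)) 1 := by norm_num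
  rw [hzero, ← pv_enum_flatMap]
  apply List.flatMap_congr
  intro p hp
  obtain ⟨k, hk, hk1, hk2⟩ := pv_enum_mem hyp 0 p hp
  have hhyp : PySem.List.pyGet? hyp p.1 = some p.2 := by
    rw [hk1]
    simpa [PySem.List.pyGet?_natCast] using hk2
  exact pv_row hyp ref p.1 p.2 hhyp (by omega) (by omega)
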